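-- pv_equiv track=rewrite | github.com/Team-Atlanta/aixcc-asc-atlantis | crs/src/vapi/competition_api/bisection_algorithm.py | delta_sequence
-- ===== SOURCE A (Python) =====
-- from typing import Awaitable, Callable, Iterator
--
-- def delta_sequence(limit: int) -> Iterator[int]:
--     """0, -1, 1, -2, 2, -3, 3, ... (OEIS A130472)"""
--     if limit <= 0: return
--
--     i = 0
--     yield i
--     limit -= 1
--     if limit == 0: return
--
--     while True:
--         i += 1
--
--         yield -i
--         limit -= 1
--         if limit == 0: return
--
--         yield i
--         limit -= 1
--         if limit == 0: return
-- ===== SOURCE B (Python) =====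
-- def _term(n):
--     return 0 if n == 0 else (n + 1) // 2 * (-1 if n % 2 else 1)
--
-- def delta_sequence(limit: int):
--     for n in range(limit):
--         yield _term(n)
-- ===== Notes on version B (the rewrite author's own statement) =====
-- stated objective: simpler
-- what changed: Replaces the stateful counter with paired yields and per-yield limit checks by a single range loop yielding a closed-form value computed from the index.
import Mathlib
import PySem

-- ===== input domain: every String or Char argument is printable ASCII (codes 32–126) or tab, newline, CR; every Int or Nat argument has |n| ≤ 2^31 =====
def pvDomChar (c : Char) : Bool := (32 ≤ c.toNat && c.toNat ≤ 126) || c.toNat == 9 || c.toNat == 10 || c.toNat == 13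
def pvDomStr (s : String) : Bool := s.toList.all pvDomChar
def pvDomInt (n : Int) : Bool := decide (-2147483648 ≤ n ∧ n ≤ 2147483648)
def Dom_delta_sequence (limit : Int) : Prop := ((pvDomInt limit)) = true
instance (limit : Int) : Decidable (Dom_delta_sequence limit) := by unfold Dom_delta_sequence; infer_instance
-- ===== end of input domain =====

-- B replaces A's stateful counter with paired yields by one range loop over a closed-form term (objective: simpler).

-- ===== PORT A =====
-- A's while-loop: each iteration increments i and yields -i then i, each yield
-- decrementing limit and returning when it hits 0; modelled by structural
-- recursion on the remaining number of yields (limit - 1 after the initial 0).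
def deltaLoopA : Nat → Int → List Int
  | 0, _ => []
  | 1, i => [-i]
  | n + 2, i => -i :: i :: deltaLoopA n (i + 1)

def delta_sequence (limit : Int) : List Int :=
  if limit ≤ 0 then []
  else 0 :: deltaLoopA (limit - 1).toNat 1

-- ===== PORT B =====
def pvTermB (n : Int) : Int :=
  if n = 0 then 0
  else PySem.Int.floordiv (n + 1) 2 * (if PySem.Int.mod n 2 ≠ 0 then -1 else 1)

def delta_sequence_alt (limit : Int) : List Int :=
  (PySem.List.pyRange 0 limit 1).map pvTermB

-- ===== PRECONDITION & SPEC =====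
def Spec_delta_sequence (limit : Int) (out : List Int) : Prop := out = delta_sequence_alt limit
instance (limit : Int) (out : List Int) : Decidable (Spec_delta_sequence limit out) := by unfold Spec_delta_sequence; infer_instance

-- ===== CLAIM (what is proved, stated in full; the proofs are below) =====
def Claim_equal_delta_sequence : Prop := ∀ (limit : Int), Dom_delta_sequence limit → Spec_delta_sequence limit (delta_sequence limit)

-- ===== LEMMAS AND PROOFS =====

lemma pvTermB_odd (i : Int) : pvTermB (2 * i - 1) = -i := by
  have hne : (2 * i - 1) ≠ 0 := by omega
  have hmod : PySem.Int.mod (2 * i - 1) 2 = 1 := by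
    rw [PySem.Int.mod_eq_emod_of_pos (by norm_num)]; omega
  have hdiv : PySem.Int.floordiv (2 * i - 1 + 1) 2 = i := by
    rw [PySem.Int.floordiv_eq_ediv_of_pos (by norm_num)]; omega
  unfold pvTermB
  rw [if_neg hne, hmod, hdiv]
  norm_num

lemma pvTermB_even (i : Int) (hi : 1 ≤ i) : pvTermB (2 * i) = i := by
  have hne : (2 * i) ≠ 0 := by omega
  have hmod : PySem.Int.mod (2 * i) 2 = 0 := by
    rw [PySem.Int.mod_eq_emod_of_pos (by norm_num)]; omega
  have hdiv : PySem.Int.floordiv (2 * i + 1) 2 = i := by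
    rw [PySem.Int.floordiv_eq_ediv_of_pos (by norm_num)]; omega
  unfold pvTermB
  rw [if_neg hne, hmod, hdiv]
  norm_num

lemma loop_eq : ∀ (rem : Nat) (i : Int), 1 ≤ i →
    (List.range rem).map (fun j : Nat => pvTermB ((j : Int) + (2 * i - 1))) = deltaLoopA rem i := by
  intro rem
  induction rem using Nat.strong_induction_on with
  | _ rem ih =>
    intro i hi
    match rem with
    | 0 => simp [deltaLoopA]
    | 1 =>
      simp [deltaLoopA, List.range_succ]
      exact pvTermB_odd i
    | n + 2 =>
      have h1 : List.range (n + 2) = 0 :: (List.range (n + 1)).map (· + 1) := by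
        simp [List.range_succ_eq_map]
      have h2 : List.range (n + 1) = 0 :: (List.range n).map (· + 1) := by
        simp [List.range_succ_eq_map]
      rw [h1, h2]
      simp only [List.map_cons, List.map_map]
      have e0 : pvTermB ((0 : Nat) + (2 * i - 1)) = -i := by
        simpa using pvTermB_odd i
      have e1 : pvTermB (((0 : Nat) + 1 : Nat) + (2 * i - 1)) = i := by
        have : (((0 : Nat) + 1 : Nat) : Int) + (2 * i - 1) = 2 * i := by push_cast; ring
        rw [this]; exact pvTermB_even i hi
      rw [e0, e1]
      simp only [deltaLoopA, List.cons.injEq, true_and]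
      have := ih n (by omega) (i + 1) (by omega)
      rw [← this]
      apply List.map_congr_left
      intro j _
      simp only [Function.comp]
      congr 1
      push_cast; ring

-- ===== VERDICT (by name: the statement is the Claim_ definition above) =====
theorem delta_sequence_spec : Claim_equal_delta_sequence := by
  intro limit _
  unfold Spec_delta_sequence delta_sequence delta_sequence_alt
  rw [PySem.List.pyRange_one]
  by_cases h : limit ≤ 0
  · have : (limit - 0).toNat = 0 := by omega
    rw [this]
    simp [h]
  · have h1 : 1 ≤ limit := by omega
    have hm : (limit - 0).toNat = (limit - 1).toNat + 1 := by omega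
    rw [if_neg h, hm, List.range_succ_eq_map]
    simp only [List.map_cons, List.map_map]
    have e0 : pvTermB ((0 : Int) + ((0 : Nat) : Int)) = 0 := by norm_num [pvTermB]
    rw [e0]
    congr 1
    rw [← loop_eq (limit - 1).toNat 1 le_rfl]
    apply List.map_congr_left
    intro j _
    simp only [Function.comp, Nat.succ_eq_add_one]
    congr 1
    push_cast; ring
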